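-- pv_equiv track=rewrite | github.com/TimTrue/Tim_SK | sk_scum/pyth_ex.py | get_unique_words
-- ===== SOURCE A (Python) =====
-- def get_unique_words(text):
--     for i in punctuation_list:
--         text = text.replace(i, ' ')
--     text = text.lower()
--     text_lst = text.split()
--     text_lst = list(set(text_lst))
--     text_lst.sort()
--     return text_lst
--
-- punctuation_list = ['.', ',', ';', ':', '...', '!', '?', '-', '"', '(', ')']
-- ===== SOURCE B (Python) =====
-- def _insert_unique(ws, w):
--     # insert w into the sorted duplicate-free list ws, keeping it sorted and unique
--     if not ws:
--         return [w]
--     if ws[0] < w: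
--         return [ws[0]] + _insert_unique(ws[1:], w)
--     if ws[0] == w:
--         return ws
--     return [w] + ws
--
-- def get_unique_words(text):
--     # single character scan: cut words at whitespace/punctuation and merge each
--     # finished word into an incrementally maintained sorted unique list
--     out = []
--     word = ''
--     for ch in text.lower():
--         if ch in ' \t\n\x0b\x0c\r.,:;!?-"()':
--             if word:
--                 out = _insert_unique(out, word)
--             word = ''
--         else:
--             word += ch
--     if word:
--         out = _insert_unique(out, word)
--     return out
-- ===== Notes on version B (the rewrite author's own statement) =====
-- stated objective: alternative
-- what changed: Replaces A's staged pipeline (eleven whole-string replace passes, then lower/split/set/sort) by a single character scan that cuts words at separator characters and merges each finished word into an incrementally maintained sorted duplicate-free list, so no set and no final sort exist.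
import Mathlib
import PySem

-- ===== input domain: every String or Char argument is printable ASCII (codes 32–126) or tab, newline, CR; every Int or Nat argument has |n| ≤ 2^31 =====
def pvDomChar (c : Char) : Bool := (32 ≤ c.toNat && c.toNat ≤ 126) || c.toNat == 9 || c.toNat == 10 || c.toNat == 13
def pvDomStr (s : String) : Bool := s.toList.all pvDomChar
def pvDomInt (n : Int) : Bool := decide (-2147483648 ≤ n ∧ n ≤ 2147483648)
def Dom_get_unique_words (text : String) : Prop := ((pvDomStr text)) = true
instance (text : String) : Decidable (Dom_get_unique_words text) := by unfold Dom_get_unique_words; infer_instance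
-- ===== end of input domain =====

-- B replaces A's staged pipeline (11 replace passes, lower, split, set, sort) by a single
-- character scan merging each finished word into an incrementally kept sorted unique list (alternative).

-- ===== PORT A =====
def punctuation_list : List String := [".", ",", ";", ":", "...", "!", "?", "-", "\"", "(", ")"]

def get_unique_words (text : String) : List String :=
  let text := punctuation_list.foldl (fun s i => PySem.Str.replace s i " ") text
  let text := PySem.Str.lower text
  let text_lst := PySem.Str.split₀ text
  let text_lst := PySem.Set.ofList text_lst
  PySem.List.sorted text_lst (fun x => x) false

-- ===== PORT B =====
-- separators: ' \t\n\x0b\x0c\r.,:;!?-"()'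
def pvSeps : List Char := [' ', '\t', '\n', '\x0b', '\x0c', '\r', '.', ',', ':', ';', '!', '?', '-', '"', '(', ')']

def pvInsertUnique : List String → String → List String
  | [], w => [w]
  | x :: xs, w => if x < w then x :: pvInsertUnique xs w else if x = w then x :: xs else w :: x :: xs

def pvStep (s : List String × List Char) (ch : Char) : List String × List Char :=
  if ch ∈ pvSeps then
    (if s.2.isEmpty then s.1 else pvInsertUnique s.1 (String.ofList s.2), [])
  else (s.1, s.2 ++ [ch])

def get_unique_words_alt (text : String) : List String :=
  let p := (PySem.Str.lower text).toList.foldl pvStep ([], [])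
  if p.2.isEmpty then p.1 else pvInsertUnique p.1 (String.ofList p.2)

-- ===== PRECONDITION & SPEC =====
def Spec_get_unique_words (text : String) (out : List String) : Prop := out = get_unique_words_alt text
instance (text : String) (out : List String) : Decidable (Spec_get_unique_words text out) := by unfold Spec_get_unique_words; infer_instance

-- ===== CLAIM (what is proved, stated in full; the proofs are below) =====
def Claim_equal_get_unique_words : Prop := ∀ (text : String), Dom_get_unique_words text → Spec_get_unique_words text (get_unique_words text)

-- ===== LEMMAS AND PROOFS =====

-- ---- A-side: the replace chain is a per-character map ----
def pvRepl (c : Char) (x : Char) : Char := if x = c then ' ' else x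

def pvTable (c : Char) : Char :=
  if c ∈ ['.', ',', ';', ':', '!', '?', '-', '"', '(', ')'] then ' ' else c

theorem go_single (c : Char) : ∀ (l : List Char) (fuel : Nat) (acc : List Char),
    l.length ≤ fuel →
    PySem.Chars.replace.go [c] [' '] fuel l acc = acc.reverse ++ l.map (pvRepl c) := by
  intro l
  induction l with
  | nil =>
      intro fuel acc _
      cases fuel <;> simp [PySem.Chars.replace.go]
  | cons a t ih =>
      intro fuel acc h
      cases fuel with
      | zero => simp at h
      | succ n =>
        simp only [PySem.Chars.replace.go, List.isPrefixOf]
        by_cases hc : c = a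
        · subst hc
          simp only [beq_self_eq_true, Bool.true_and, if_true, List.length_cons] at *
          rw [show List.drop (([] : List Char).length + 1) (c :: t) = t by simp,
            show ([' '].reverse ++ acc) = ' ' :: acc by simp,
            ih n (' ' :: acc) (by omega)]
          simp [pvRepl]
        · have : (c == a) = false := by simp [hc]
          simp only [this, Bool.false_and]
          rw [ih n (a :: acc) (by simp at h; omega)]
          have : pvRepl c a = a := by simp [pvRepl]; intro h'; exact absurd h'.symm hc
          simp [this]

theorem replace_single (c : Char) (l : List Char) :
    PySem.Chars.replace l [c] [' '] = l.map (pvRepl c) := by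
  simp [PySem.Chars.replace, go_single c l l.length [] (le_refl _)]

theorem go_nodot : ∀ (l : List Char) (fuel : Nat) (acc : List Char),
    '.' ∉ l →
    PySem.Chars.replace.go ['.', '.', '.'] [' '] fuel l acc = acc.reverse ++ l := by
  intro l
  induction l with
  | nil => intro fuel acc _; cases fuel <;> simp [PySem.Chars.replace.go]
  | cons a t ih =>
      intro fuel acc h
      cases fuel with
      | zero => simp [PySem.Chars.replace.go]
      | succ n =>
        have ha : a ≠ '.' := fun h' => h (by simp [h'])
        have : ('.' == a) = false := by simp; exact fun h' => ha h'.symm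
        simp only [PySem.Chars.replace.go, List.isPrefixOf, this, Bool.false_and]
        rw [ih n (a :: acc) (fun h' => h (by simp [h']))]
        simp

theorem replace_nodot (l : List Char) (h : '.' ∉ l) :
    PySem.Chars.replace l ['.', '.', '.'] [' '] = l := by
  simp [PySem.Chars.replace, go_nodot l l.length [] h]

theorem nodot_after (l : List Char) : '.' ∉ l.map (pvRepl '.') := by
  intro h
  rcases List.mem_map.mp h with ⟨x, _, hx⟩
  by_cases hxd : x = '.' <;> simp [pvRepl, hxd] at hx

theorem nodot_map (c : Char) (l : List Char) (h : '.' ∉ l) : '.' ∉ l.map (pvRepl c) := by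
  intro h'
  rcases List.mem_map.mp h' with ⟨x, hx, hxe⟩
  by_cases hxc : x = c
  · simp [pvRepl, hxc] at hxe
  · simp [pvRepl, hxc] at hxe
    exact h (hxe ▸ hx)

theorem table_eq (x : Char) :
    pvRepl ')' (pvRepl '(' (pvRepl '"' (pvRepl '-' (pvRepl '?' (pvRepl '!'
      (pvRepl ':' (pvRepl ';' (pvRepl ',' (pvRepl '.' x))))))))) = pvTable x := by
  by_cases h : x ∈ ['.', ',', ';', ':', '!', '?', '-', '"', '(', ')']
  · fin_cases h <;> rfl
  · simp only [List.mem_cons, List.not_mem_nil, or_false, not_or] at h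
    obtain ⟨h1, h2, h3, h4, h5, h6, h7, h8, h9, h10⟩ := h
    simp [pvRepl, pvTable, h1, h2, h3, h4, h5, h6, h7, h8, h9, h10]

set_option maxHeartbeats 1000000 in
theorem translated_eq (text : String) :
    (punctuation_list.foldl (fun s i => PySem.Str.replace s i " ") text).toList
      = text.toList.map pvTable := by
  simp only [punctuation_list, List.foldl]
  simp only [PySem.Str.toList_replace]
  have hdot : (".".toList) = ['.'] := rfl
  have hsp : (" ".toList) = [' '] := rfl
  have hddd : ("...".toList) = ['.', '.', '.'] := rfl
  rw [hdot, hsp, hddd,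
    show (",".toList) = [','] from rfl, show (";".toList) = [';'] from rfl,
    show (":".toList) = [':'] from rfl, show ("!".toList) = ['!'] from rfl,
    show ("?".toList) = ['?'] from rfl, show ("-".toList) = ['-'] from rfl,
    show ("\"".toList) = ['"'] from rfl, show ("(".toList) = ['('] from rfl,
    show (")".toList) = [')'] from rfl]
  simp only [replace_single]
  rw [replace_nodot _ (nodot_map _ _ (nodot_map _ _ (nodot_map _ _ (nodot_after _))))]
  simp only [List.map_map]
  apply List.map_congr_left
  intro x _
  simp only [Function.comp_apply]
  exact table_eq x

-- ---- character classification (on the ASCII domain) ----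
def pvF (c : Char) : Char := PySem.Chars.lowerChar (pvTable c)

theorem sep_facts (c : Char) (h : c ∈ pvSeps) :
    PySem.Chars.lowerChar c = c ∧ PySem.Chars.isspace (pvF c) = true := by
  fin_cases h <;> exact ⟨rfl, rfl⟩

theorem sep_toNat_le (c : Char) (h : c ∈ pvSeps) : c.toNat ≤ 63 := by
  fin_cases h <;> decide

theorem char_eq_of_toNat (c d : Char) (h : c.toNat = d.toNat) : c = d := by
  apply Char.ext; exact UInt32.toNat_inj.mp h

theorem nonsep_facts (c : Char) (hd : pvDomChar c = true) (h : c ∉ pvSeps) :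
    pvTable c = c ∧ PySem.Chars.lowerChar c ∉ pvSeps ∧
      PySem.Chars.isspace (PySem.Chars.lowerChar c) = false := by
  have htab : pvTable c = c := by
    unfold pvTable
    rw [if_neg]
    intro hm
    apply h
    fin_cases hm <;> simp [pvSeps]
  refine ⟨htab, ?_⟩
  have hdn : (32 ≤ c.toNat ∧ c.toNat ≤ 126) ∨ c.toNat = 9 ∨ c.toNat = 10 ∨ c.toNat = 13 := by
    simp [pvDomChar] at hd; tauto
  by_cases hu : PySem.Chars.isupper c = true
  · -- uppercase letter: lowerChar c has code c.toNat + 32 ∈ [97, 122]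
    have hb : 65 ≤ c.toNat ∧ c.toNat ≤ 90 := by
      simp [PySem.Chars.isupper, Char.le_def, UInt32.le_iff_toNat_le] at hu
      exact ⟨hu.1, hu.2⟩
    have hval : (c.toNat + 32).isValidChar := by
      left; omega
    have hlc : (PySem.Chars.lowerChar c).toNat = c.toNat + 32 := by
      simp [PySem.Chars.lowerChar, hu, Char.toNat_ofNat, hval]
    constructor
    · intro hm
      have := sep_toNat_le _ hm
      omega
    · simp only [PySem.Chars.isspace, hlc]
      simp; omega
  · -- not uppercase: lowerChar c = c, and c is a non-separator domain char, hence not whitespace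
    have hlc : PySem.Chars.lowerChar c = c := by
      simp [PySem.Chars.lowerChar, hu]
    rw [hlc]
    refine ⟨h, ?_⟩
    have h32 : c.toNat ≠ 32 := fun he => h (by
      have : c = ' ' := char_eq_of_toNat c ' ' (by simpa using he)
      simp [this, pvSeps])
    have h9 : c.toNat ≠ 9 := fun he => h (by
      have : c = '\t' := char_eq_of_toNat c '\t' (by simpa using he)
      simp [this, pvSeps])
    have h10 : c.toNat ≠ 10 := fun he => h (by
      have : c = '\n' := char_eq_of_toNat c '\n' (by simpa using he)
      simp [this, pvSeps])
    have h13 : c.toNat ≠ 13 := fun he => h (by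
      have : c = '\r' := char_eq_of_toNat c '\r' (by simpa using he)
      simp [this, pvSeps])
    simp only [PySem.Chars.isspace]
    simp; omega

-- ---- the merge step keeps a sorted duplicate-free list ----
theorem mem_insertUnique (s : List String) (w y : String) :
    y ∈ pvInsertUnique s w ↔ y = w ∨ y ∈ s := by
  induction s with
  | nil => simp [pvInsertUnique]
  | cons x xs ih =>
      simp only [pvInsertUnique]
      split_ifs with h1 h2
      · simp [ih]; tauto
      · subst h2; simp
      · simp

theorem add_cons_of_ne (x w : String) (xs : List String) (hne : w ≠ x) :
    PySem.Set.add (x :: xs) w = x :: PySem.Set.add xs w := by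
  simp only [PySem.Set.add, PySem.Set.contains, List.contains_cons]
  have : (w == x) = false := by simpa using hne
  rw [this]
  by_cases hmem : w ∈ xs <;> simp [hmem]

theorem add_of_mem (s : List String) (w : String) (h : w ∈ s) : PySem.Set.add s w = s := by
  simp [PySem.Set.add, PySem.Set.contains, h]

theorem add_of_not_mem (s : List String) (w : String) (h : w ∉ s) :
    PySem.Set.add s w = s ++ [w] := by
  simp [PySem.Set.add, PySem.Set.contains, h]

theorem insertUnique_sorted_perm (s : List String) (w : String) (hs : s.Pairwise (· < ·)) :
    (pvInsertUnique s w).Pairwise (· < ·) ∧ (pvInsertUnique s w).Perm (PySem.Set.add s w) := by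
  induction s with
  | nil => simp [pvInsertUnique, PySem.Set.add, PySem.Set.contains]
  | cons x xs ih =>
      rcases List.pairwise_cons.mp hs with ⟨hx, hxs⟩
      rcases ih hxs with ⟨ih1, ih2⟩
      simp only [pvInsertUnique]
      split_ifs with h1 h2
      · refine ⟨?_, ?_⟩
        · refine List.pairwise_cons.mpr ⟨?_, ih1⟩
          intro y hy
          rcases (mem_insertUnique xs w y).mp hy with rfl | hy'
          · exact h1
          · exact hx y hy'
        · rw [add_cons_of_ne x w xs (ne_of_gt h1)]
          exact ih2.cons x
      · subst h2
        rw [add_of_mem _ _ (List.mem_cons_self)]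
        exact ⟨hs, List.Perm.refl _⟩
      · have hwx : w < x := lt_of_le_of_ne (not_lt.mp h1) (fun e => h2 e.symm)
        have hnot : w ∉ x :: xs := by
          intro hw
          rcases List.mem_cons.mp hw with rfl | hw'
          · exact absurd rfl (ne_of_gt hwx)
          · exact absurd (lt_trans hwx (hx w hw')) (lt_irrefl w)
        refine ⟨?_, ?_⟩
        · refine List.pairwise_cons.mpr ⟨?_, hs⟩
          intro y hy
          rcases List.mem_cons.mp hy with rfl | hy'
          · exact hwx
          · exact lt_trans hwx (hx y hy')
        · rw [add_of_not_mem _ _ hnot]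
          exact (List.perm_append_singleton w (x :: xs)).symm

theorem add_perm (s t : List String) (w : String) (h : s.Perm t) :
    (PySem.Set.add s w).Perm (PySem.Set.add t w) := by
  by_cases hm : w ∈ s
  · rw [add_of_mem s w hm, add_of_mem t w (h.mem_iff.mp hm)]
    exact h
  · rw [add_of_not_mem s w hm, add_of_not_mem t w (fun hw => hm (h.mem_iff.mpr hw))]
    exact h.append_right [w]

theorem update_perm (ws : List String) : ∀ (s t : List String), s.Perm t →
    (PySem.Set.update s ws).Perm (PySem.Set.update t ws) := by
  induction ws with
  | nil => intro s t h; simpa [PySem.Set.update] using h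
  | cons w ws ih =>
      intro s t h
      simpa [PySem.Set.update] using ih _ _ (add_perm s t w h)

theorem foldl_insertUnique (ws : List String) : ∀ (out : List String), out.Pairwise (· < ·) →
    (ws.foldl pvInsertUnique out).Pairwise (· < ·) ∧
      (ws.foldl pvInsertUnique out).Perm (PySem.Set.update out ws) := by
  induction ws with
  | nil => intro out h; exact ⟨h, by simp [PySem.Set.update]⟩
  | cons w ws ih =>
      intro out h
      rcases insertUnique_sorted_perm out w h with ⟨h1, h2⟩
      rcases ih (pvInsertUnique out w) h1 with ⟨g1, g2⟩
      refine ⟨g1, ?_⟩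
      simp only [List.foldl_cons]
      have he : PySem.Set.update out (w :: ws) = PySem.Set.update (PySem.Set.add out w) ws := by
        simp [PySem.Set.update]
      rw [he]
      exact g2.trans (update_perm ws _ _ h2)

-- ---- tokenisation: the scan produces exactly split₀'s words ----
def pvFinish (p : List String × List Char) : List String :=
  if p.2.isEmpty then p.1 else pvInsertUnique p.1 (String.ofList p.2)

theorem go_acc : ∀ (s cur : List Char) (acc : List (List Char)),
    PySem.Chars.split₀.go s cur acc = acc.reverse ++ PySem.Chars.split₀.go s cur [] := by
  intro s
  induction s with
  | nil =>
      intro cur acc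
      by_cases hc : cur.isEmpty <;> simp [PySem.Chars.split₀.go, hc]
  | cons c rest ih =>
      intro cur acc
      by_cases hs : PySem.Chars.isspace c
      · by_cases hc : cur.isEmpty
        · simp only [PySem.Chars.split₀.go, hs, hc, if_true]
          exact ih [] acc
        · simp only [PySem.Chars.split₀.go, hs, hc, if_true]
          rw [ih [] (cur.reverse :: acc), ih [] [cur.reverse]]
          simp
      · simp only [PySem.Chars.split₀.go, hs]
        exact ih (c :: cur) acc

theorem main_scan : ∀ (cs : List Char), (∀ c ∈ cs, pvDomChar c = true) →
    ∀ (out : List String) (word : List Char),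
    pvFinish ((cs.map PySem.Chars.lowerChar).foldl pvStep (out, word))
      = (PySem.Chars.split₀.go (cs.map pvF) word.reverse []).foldl
          (fun s w => pvInsertUnique s (String.ofList w)) out := by
  intro cs
  induction cs with
  | nil =>
      intro _ out word
      cases word with
      | nil => simp [pvFinish, PySem.Chars.split₀.go]
      | cons a w =>
          simp [pvFinish, PySem.Chars.split₀.go, List.isEmpty_cons]
  | cons c rest ih =>
      intro hD out word
      have hDc : pvDomChar c = true := hD c (List.mem_cons_self)
      have hDr : ∀ c' ∈ rest, pvDomChar c' = true := fun c' hc' => hD c' (List.mem_cons_of_mem c hc')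
      by_cases hsep : c ∈ pvSeps
      · rcases sep_facts c hsep with ⟨hlc, hsp⟩
        have hF : PySem.Chars.isspace (pvF c) = true := hsp
        cases word with
        | nil =>
            simp only [List.map_cons, List.foldl_cons, pvStep, hlc, hsep, if_pos, List.reverse_nil]
            rw [show (([] : List Char).isEmpty) = true from rfl]
            simp only [if_true, PySem.Chars.split₀.go, hF, List.isEmpty_nil, if_true]
            exact ih hDr out []
        | cons a w =>
            simp only [List.map_cons, List.foldl_cons, pvStep, hlc, hsep, if_pos,
              List.isEmpty_cons]
            have hgo : PySem.Chars.split₀.go (pvF c :: rest.map pvF) (a :: w).reverse []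
                = (a :: w) :: PySem.Chars.split₀.go (rest.map pvF) [] [] := by
              have hne : ((a :: w).reverse.isEmpty) = false := by simp
              simp only [PySem.Chars.split₀.go, hF, if_true, hne]
              rw [if_neg (by simp), go_acc (rest.map pvF) [] [(a :: w).reverse.reverse]]
              simp
            rw [hgo]
            simp only [List.foldl_cons]
            exact ih hDr (pvInsertUnique out (String.ofList (a :: w))) []
      · rcases nonsep_facts c hDc hsep with ⟨htab, hnl, hnsF⟩
        have hFc : pvF c = PySem.Chars.lowerChar c := by simp [pvF, htab]
        simp only [List.map_cons, List.foldl_cons, pvStep]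
        rw [if_neg hnl]
        have hgo : PySem.Chars.split₀.go (pvF c :: rest.map pvF) word.reverse []
            = PySem.Chars.split₀.go (rest.map pvF) (PySem.Chars.lowerChar c :: word.reverse) [] := by
          simp only [PySem.Chars.split₀.go, hFc, hnsF]
          simp
        rw [hgo]
        have : PySem.Chars.lowerChar c :: word.reverse = (word ++ [PySem.Chars.lowerChar c]).reverse := by
          simp
        rw [this]
        exact ih hDr out (word ++ [PySem.Chars.lowerChar c])

-- ===== VERDICT (by name: the statement is the Claim_ definition above) =====
theorem get_unique_words_spec : Claim_equal_get_unique_words := by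
  intro text hdom
  unfold Spec_get_unique_words
  have hD : ∀ c ∈ text.toList, pvDomChar c = true := by
    intro c hc
    exact List.all_eq_true.mp hdom c hc
  -- the words A splits out
  set W : List String := PySem.Str.split₀ (PySem.Str.lower
    (punctuation_list.foldl (fun s i => PySem.Str.replace s i " ") text)) with hW
  have hWchars : W.map String.toList = PySem.Chars.split₀.go (text.toList.map pvF) [] [] := by
    rw [hW, PySem.Str.split₀_map_toList, PySem.Str.toList_lower, translated_eq]
    simp only [PySem.Chars.lower, PySem.Chars.split₀, List.map_map]
    rw [List.map_congr_left (l := text.toList)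
      (f := PySem.Chars.lowerChar ∘ pvTable) (g := pvF) (fun x _ => rfl)]
  -- B computes the foldl of the merge step over W
  have hB : get_unique_words_alt text = W.foldl pvInsertUnique [] := by
    have h1 : (PySem.Str.lower text).toList = text.toList.map PySem.Chars.lowerChar := by
      rw [PySem.Str.toList_lower]; rfl
    have h2 := main_scan text.toList hD [] []
    simp only [List.reverse_nil] at h2
    show pvFinish ((PySem.Str.lower text).toList.foldl pvStep ([], [])) = _
    rw [h1, h2, ← hWchars, List.foldl_map]
    simp [String.ofList_toList]
  -- the merged list is sorted(set(W))
  rcases foldl_insertUnique W [] (List.Pairwise.nil) with ⟨hsorted, hperm⟩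
  have hofList : PySem.Set.update ([] : List String) W = PySem.Set.ofList W := rfl
  rw [hofList] at hperm
  rw [hB]
  show PySem.List.sorted (PySem.Set.ofList W) (fun x => x) false = W.foldl pvInsertUnique []
  exact PySem.List.sorted_eq_of_perm_of_pairwise_lt (PySem.Set.ofList W)
    (W.foldl pvInsertUnique []) (fun x => x) hperm hsorted
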